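-- pv_equiv track=rewrite | github.com/georgia-tech-db/TokenSmith | src/llm_benchmark_generation/markdown_utils.py | extract_pages
-- ===== SOURCE A (Python) =====
-- def extract_pages(
--     full_text: str,
--     offsets:   dict[int, int],
--     start:     int,
--     end:       int,
-- ) -> str:
--     """
--     Return the raw markdown text for pages [start, end] inclusive.
--
--     Raises ValueError if start page is not in the offset index.
--     """
--     if start not in offsets:
--         raise ValueError(
--             f"Page {start} not found in markdown. "
--             f"Available range: {min(offsets)}–{max(offsets)}"
--         )
--
--     begin_char = offsets[start]
--     max_page   = max(offsets.keys())
--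
--     # Find the first page AFTER our range that exists in the index
--     next_page = end + 1
--     while next_page <= max_page and next_page not in offsets:
--         next_page += 1
--
--     end_char = offsets.get(next_page, len(full_text))
--     return full_text[begin_char:end_char]
-- ===== SOURCE B (Python) =====
-- def extract_pages(
--     full_text: str,
--     offsets:   dict[int, int],
--     start:     int,
--     end:       int,
-- ) -> str:
--     """
--     Return the raw markdown text for pages [start, end] inclusive.
--
--     Raises ValueError if start page is not in the offset index.
--     """
--     if start not in offsets:
--         raise ValueError(
--             f"Page {start} not found in markdown. "
--             f"Available range: {min(offsets)}–{max(offsets)}"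
--         )
--
--     begin_char = offsets[start]
--     next_keys = [p for p in offsets if p > end]
--     end_char = offsets[min(next_keys)] if next_keys else len(full_text)
--     return full_text[begin_char:end_char]
-- ===== Notes on version B (the rewrite author's own statement) =====
-- stated objective: simpler
-- what changed: Replaced the max_page computation and the unit-step while-scan over candidate page numbers with a single filter of the existing keys greater than end, taking offsets[min(next_keys)] (or len(full_text) if none).
import Mathlib
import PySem

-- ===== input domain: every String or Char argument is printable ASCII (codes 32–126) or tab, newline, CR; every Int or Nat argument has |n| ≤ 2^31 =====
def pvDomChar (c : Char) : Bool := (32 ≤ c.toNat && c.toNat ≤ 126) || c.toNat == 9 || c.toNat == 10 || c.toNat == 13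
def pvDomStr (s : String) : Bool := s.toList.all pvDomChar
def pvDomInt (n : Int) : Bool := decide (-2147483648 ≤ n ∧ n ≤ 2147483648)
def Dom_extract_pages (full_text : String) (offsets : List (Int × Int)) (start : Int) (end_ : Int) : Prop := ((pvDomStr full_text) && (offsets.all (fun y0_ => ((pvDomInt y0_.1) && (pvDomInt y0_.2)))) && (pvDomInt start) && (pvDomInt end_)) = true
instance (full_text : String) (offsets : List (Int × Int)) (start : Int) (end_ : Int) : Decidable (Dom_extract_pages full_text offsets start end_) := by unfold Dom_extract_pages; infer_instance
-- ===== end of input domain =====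

-- B replaces A's unit-step while-scan for the next existing page with a direct
-- filter-and-minimum over the existing keys beyond `end` (simpler; same result).


-- ===== PORT A =====
-- the 'while next_page <= max_page and next_page not in offsets: next_page += 1'
-- loop, run on fuel (enough fuel is supplied at the call site; each step is one
-- Python iteration)
def extract_pages_scan (d : PySem.Dict Int Int) (maxp : Int) : Nat → Int → Int
  | 0, p => p
  | fuel + 1, p =>
      if p ≤ maxp ∧ d.contains p = false then extract_pages_scan d maxp fuel (p + 1) else p

def extract_pages (full_text : String) (offsets : List (Int × Int)) (start : Int) (end_ : Int) : String :=
  let d := PySem.Dict.ofList offsets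
  if d.contains start = false then ""   -- Python: raise ValueError (excluded by Pre_)
  else
    match d.get? start with
    | none => ""                        -- unreachable: start is in the dict
    | some begin_char =>
      match PySem.List.max? d.keys (fun x => x) with
      | none => ""                      -- unreachable: keys nonempty
      | some max_page =>
        let next_page := extract_pages_scan d max_page (max_page - end_).toNat (end_ + 1)
        let end_char := d.getD next_page (PySem.Str.len full_text)
        PySem.Str.slice full_text (some begin_char) (some end_char)

-- ===== PORT B =====
def extract_pages_alt (full_text : String) (offsets : List (Int × Int)) (start : Int) (end_ : Int) : String :=
  let d := PySem.Dict.ofList offsets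
  match d.get? start with
  | none => ""                          -- Python: raise ValueError (excluded by Pre_)
  | some begin_char =>
    let next_keys := d.keys.filter (fun p => end_ < p)
    let end_char :=
      match PySem.List.min? next_keys (fun x => x) with
      | some m => (d.get? m).getD 0     -- offsets[min(next_keys)]; the key exists
      | none => PySem.Str.len full_text
    PySem.Str.slice full_text (some begin_char) (some end_char)

-- ===== PRECONDITION & SPEC =====
-- Pre_ excludes exactly the inputs on which the Python raises ValueError:
-- those where start is not a key of the offset index.
def Pre_extract_pages (full_text : String) (offsets : List (Int × Int)) (start : Int) (end_ : Int) : Prop :=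
  start ∈ (PySem.Dict.ofList offsets).keys
instance (full_text : String) (offsets : List (Int × Int)) (start : Int) (end_ : Int) : Decidable (Pre_extract_pages full_text offsets start end_) := by unfold Pre_extract_pages; infer_instance

def pvWitness_extract_pages : String × (List (Int × Int)) × Int × Int := ("hello world", [(1, 0), (2, 5), (3, 8)], 1, 2)

def Spec_extract_pages (full_text : String) (offsets : List (Int × Int)) (start : Int) (end_ : Int) (out : String) : Prop := out = extract_pages_alt full_text offsets start end_
instance (full_text : String) (offsets : List (Int × Int)) (start : Int) (end_ : Int) (out : String) : Decidable (Spec_extract_pages full_text offsets start end_ out) := by unfold Spec_extract_pages; infer_instance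

-- ===== CLAIM (what is proved, stated in full; the proofs are below) =====
def Claim_equal_extract_pages : Prop := ∀ (full_text : String) (offsets : List (Int × Int)) (start : Int) (end_ : Int), Dom_extract_pages full_text offsets start end_ → Pre_extract_pages full_text offsets start end_ → Spec_extract_pages full_text offsets start end_ (extract_pages full_text offsets start end_)

-- ===== LEMMAS AND PROOFS =====

-- If some key lies strictly beyond end_, the scan returns the least such key m.
lemma scan_finds_min (d : PySem.Dict Int Int) (maxp end_ m : Int)
    (hmax : ∀ q ∈ d.keys, q ≤ maxp)
    (hm : m ∈ d.keys) (hm1 : end_ < m)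
    (hmin : ∀ q ∈ d.keys, end_ < q → m ≤ q) :
    ∀ (fuel : Nat) (p : Int), end_ < p → p ≤ m → (m - p).toNat < fuel →
      extract_pages_scan d maxp fuel p = m := by
  intro fuel
  induction fuel with
  | zero => intro p _ _ h; omega
  | succ n ih =>
    intro p hp hpm hfuel
    rcases eq_or_lt_of_le hpm with heq | hlt
    · subst heq
      have hc : d.contains p = true := (PySem.Dict.contains_iff_mem_keys d p).mpr hm
      simp [extract_pages_scan, hc]
    · have hc : d.contains p = false := by
        rcases Bool.eq_false_or_eq_true (d.contains p) with h | h
        · exact absurd (hmin p ((PySem.Dict.contains_iff_mem_keys d p).mp h) hp) (by omega)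
        · exact h
      have hle : p ≤ maxp := le_trans (le_of_lt hlt) (hmax m hm)
      have hcond : p ≤ maxp ∧ d.contains p = false := ⟨hle, hc⟩
      simp only [extract_pages_scan, if_pos hcond]
      exact ih (p + 1) (by omega) (by omega) (by omega)

-- If no key lies strictly beyond end_, the scan never lands on a key.
lemma scan_no_key (d : PySem.Dict Int Int) (maxp end_ : Int)
    (hno : ∀ q ∈ d.keys, ¬ end_ < q) :
    ∀ (fuel : Nat) (p : Int), end_ < p → d.contains (extract_pages_scan d maxp fuel p) = false := by
  intro fuel
  induction fuel with
  | zero =>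
    intro p hp
    rcases Bool.eq_false_or_eq_true (d.contains p) with h | h
    · exact absurd hp (hno p ((PySem.Dict.contains_iff_mem_keys d p).mp h))
    · simpa [extract_pages_scan] using h
  | succ n ih =>
    intro p hp
    by_cases hcond : p ≤ maxp ∧ d.contains p = false
    · simp only [extract_pages_scan, if_pos hcond]
      exact ih (p + 1) (by omega)
    · simp only [extract_pages_scan, if_neg hcond]
      rcases Bool.eq_false_or_eq_true (d.contains p) with h | h
      · exact absurd hp (hno p ((PySem.Dict.contains_iff_mem_keys d p).mp h))
      · exact h

-- ===== VERDICT (by name: the statement is the Claim_ definition above) =====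
theorem extract_pages_spec : Claim_equal_extract_pages := by
  intro full_text offsets start end_ _ hpre
  unfold Spec_extract_pages extract_pages extract_pages_alt
  dsimp only
  generalize hd : PySem.Dict.ofList offsets = d
  rw [Pre_extract_pages, hd] at hpre
  have hc : d.contains start = true := (PySem.Dict.contains_iff_mem_keys d start).mpr hpre
  rw [if_neg (by simp [hc])]
  obtain ⟨bc, hbc⟩ : ∃ v, d.get? start = some v := by
    rcases h : d.get? start with _ | v
    · rw [PySem.Dict.get?_eq_none_iff_contains] at h; rw [hc] at h; cases h
    · exact ⟨v, rfl⟩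
  obtain ⟨maxp, hmaxp⟩ : ∃ m, PySem.List.max? d.keys (fun x => x) = some m := by
    rcases h : PySem.List.max? d.keys (fun x => x) with _ | m
    · rw [PySem.List.max?_eq_none_iff] at h
      rw [h] at hpre; cases hpre
    · exact ⟨m, rfl⟩
  rw [hbc, hmaxp]
  dsimp only
  have hmax : ∀ q ∈ d.keys, q ≤ maxp := fun q hq => PySem.List.max?_isMax hmaxp q hq
  rcases hmin : PySem.List.min? (d.keys.filter (fun p => decide (end_ < p))) (fun x => x) with _ | m
  · -- no key beyond end_: the scan never lands on a key, end_char = len(full_text)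
    rw [PySem.List.min?_eq_none_iff] at hmin
    have hno : ∀ q ∈ d.keys, ¬ end_ < q := by
      intro q hq hlt
      have : q ∈ d.keys.filter (fun p => decide (end_ < p)) := by
        simp [List.mem_filter, hq, hlt]
      rw [hmin] at this; cases this
    have hnc := scan_no_key d maxp end_ hno (maxp - end_).toNat (end_ + 1) (by omega)
    rw [PySem.Dict.getD_eq_get?_getD, (PySem.Dict.get?_eq_none_iff_contains _ _).mpr hnc]
    rfl
  · -- least key m beyond end_: the scan returns m, end_char = offsets[m]
    have hm' := PySem.List.min?_mem hmin
    rw [List.mem_filter] at hm'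
    obtain ⟨hmk, hmgt⟩ := hm'
    have hmgt' : end_ < m := of_decide_eq_true hmgt
    have hminle : ∀ q ∈ d.keys, end_ < q → m ≤ q := by
      intro q hq hlt
      exact PySem.List.min?_isMin hmin q (by simp [List.mem_filter, hq, hlt])
    have hscan : extract_pages_scan d maxp (maxp - end_).toNat (end_ + 1) = m := by
      apply scan_finds_min d maxp end_ m hmax hmk hmgt' hminle
      · omega
      · omega
      · have := hmax m hmk; omega
    rw [hscan, PySem.Dict.getD_eq_get?_getD]
    rcases h : d.get? m with _ | v
    · rw [PySem.Dict.get?_eq_none_iff_contains] at h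
      rw [(PySem.Dict.contains_iff_mem_keys d m).mpr hmk] at h; cases h
    · simp [h]
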